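-- pv_equiv track=rewrite | github.com/xorkevin/advent2015 | advent5.py | findExceptions
-- ===== SOURCE A (Python) =====
-- def findExceptions(text):
--     ex = [
--         'ab',
--         'cd',
--         'pq',
--         'xy',
--         ]
--     for i in ex:
--         if i in text:
--             return True
-- ===== SOURCE B (Python) =====
-- def findExceptions(text):
--     pairs = {'ab', 'cd', 'pq', 'xy'}
--     for a, b in zip(text, text[1:]):
--         if a + b in pairs:
--             return True
-- ===== Notes on version B (the rewrite author's own statement) =====
-- stated objective: alternative
-- what changed: Instead of scanning each of the four fixed patterns across the whole text with substring search, B makes a single left-to-right pass over the text's adjacent character pairs and tests each pair against a set; the implicit None on no match is preserved.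
import Mathlib
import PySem

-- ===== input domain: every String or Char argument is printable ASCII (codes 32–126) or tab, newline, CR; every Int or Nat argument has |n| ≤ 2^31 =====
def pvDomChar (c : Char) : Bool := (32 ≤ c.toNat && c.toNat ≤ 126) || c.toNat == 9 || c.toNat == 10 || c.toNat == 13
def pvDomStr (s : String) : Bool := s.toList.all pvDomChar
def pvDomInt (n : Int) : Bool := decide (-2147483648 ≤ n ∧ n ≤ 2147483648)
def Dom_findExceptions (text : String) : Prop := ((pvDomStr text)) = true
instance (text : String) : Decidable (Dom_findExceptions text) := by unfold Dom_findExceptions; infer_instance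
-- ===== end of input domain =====

-- B replaces four whole-text substring scans by one pass over adjacent character
-- pairs checked against a set (alternative decomposition, same asymptotic cost).

-- ===== PORT A =====
-- 'for i in ex: if i in text: return True'  (falls off the end: None)
def findExceptionsLoopA (ex : List String) (text : String) : Option Bool :=
  match ex with
  | [] => none
  | i :: rest => if PySem.Str.isIn i text then some true else findExceptionsLoopA rest text

def findExceptions (text : String) : Option Bool :=
  findExceptionsLoopA ["ab", "cd", "pq", "xy"] text

-- ===== PORT B =====
-- 'for a, b in zip(text, text[1:]): if a + b in pairs: return True'
def findExceptionsLoopB (pairs : PySem.Set String) (ps : List (Char × Char)) : Option Bool :=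
  match ps with
  | [] => none
  | (a, b) :: rest =>
      if PySem.Set.contains pairs (String.ofList [a, b]) then some true
      else findExceptionsLoopB pairs rest

def findExceptions_alt (text : String) : Option Bool :=
  let pairs : PySem.Set String := PySem.Set.ofList ["ab", "cd", "pq", "xy"]
  findExceptionsLoopB pairs (text.toList.zip (text.toList.drop 1))

-- ===== PRECONDITION & SPEC =====
def Spec_findExceptions (text : String) (out : Option Bool) : Prop := out = findExceptions_alt text
instance (text : String) (out : Option Bool) : Decidable (Spec_findExceptions text out) := by unfold Spec_findExceptions; infer_instance

-- ===== CLAIM (what is proved, stated in full; the proofs are below) =====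
def Claim_equal_findExceptions : Prop := ∀ (text : String), Dom_findExceptions text → Spec_findExceptions text (findExceptions text)

-- ===== LEMMAS AND PROOFS =====

-- common characterisation: 'some true' iff one of the four patterns is an infix
def fourSpec (l : List Char) : Option Bool :=
  if ['a','b'] <:+: l ∨ ['c','d'] <:+: l ∨ ['p','q'] <:+: l ∨ ['x','y'] <:+: l
  then some true else none

theorem two_infix_cons_cons (x y a b : Char) (t : List Char) :
    ([x, y] <:+: a :: b :: t) ↔ (x = a ∧ y = b) ∨ [x, y] <:+: b :: t := by
  rw [List.infix_cons_iff]
  constructor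
  · rintro (h | h)
    · left
      rcases List.cons_prefix_cons.mp h with ⟨hx, h2⟩
      rcases List.cons_prefix_cons.mp h2 with ⟨hy, _⟩
      exact ⟨hx, hy⟩
    · right; exact h
  · rintro (⟨hx, hy⟩ | h)
    · left; subst hx; subst hy
      exact List.cons_prefix_cons.mpr ⟨rfl, List.cons_prefix_cons.mpr ⟨rfl, List.nil_prefix⟩⟩
    · right; exact h

theorem two_not_infix_short (x y : Char) (l : List Char) (h : l.length ≤ 1) :
    ¬ ([x, y] <:+: l) := by
  intro hin
  have := hin.length_le
  simp at this
  omega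

theorem sideA (text : String) : findExceptions text = fourSpec text.toList := by
  simp only [findExceptions, findExceptionsLoopA, fourSpec, PySem.Str.isIn_iff_infix]
  split_ifs <;> first | rfl | tauto

theorem contains_pairs (a b : Char) :
    PySem.Set.contains (PySem.Set.ofList ["ab", "cd", "pq", "xy"]) (String.ofList [a, b]) = true ↔
    ('a' = a ∧ 'b' = b) ∨ ('c' = a ∧ 'd' = b) ∨ ('p' = a ∧ 'q' = b) ∨ ('x' = a ∧ 'y' = b) := by
  rw [PySem.Set.contains_iff, PySem.Set.mem_ofList]
  constructor
  · intro h
    simp only [List.mem_cons, List.not_mem_nil, or_false] at h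
    rcases h with h | h | h | h <;>
      · have := congrArg String.toList h
        simp at this
        tauto
  · rintro (⟨ha, hb⟩ | ⟨ha, hb⟩ | ⟨ha, hb⟩ | ⟨ha, hb⟩) <;> subst ha <;> subst hb <;> decide

theorem sideB_aux (l : List Char) :
    findExceptionsLoopB (PySem.Set.ofList ["ab", "cd", "pq", "xy"]) (l.zip (l.drop 1)) =
    fourSpec l := by
  match l with
  | [] => simp [findExceptionsLoopB, fourSpec, two_not_infix_short _ _ [] (by simp)]
  | [a] => simp [findExceptionsLoopB, fourSpec, two_not_infix_short _ _ [a] (by simp)]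
  | a :: b :: rest =>
    have ih := sideB_aux (b :: rest)
    simp only [List.drop_one, List.tail_cons, List.zip_cons_cons] at ih ⊢
    rw [findExceptionsLoopB]
    by_cases hc : PySem.Set.contains (PySem.Set.ofList ["ab", "cd", "pq", "xy"]) (String.ofList [a, b]) = true
    · rw [if_pos hc]
      unfold fourSpec
      rw [if_pos]
      rcases (contains_pairs a b).mp hc with ⟨h1, h2⟩ | ⟨h1, h2⟩ | ⟨h1, h2⟩ | ⟨h1, h2⟩
      · exact Or.inl ((two_infix_cons_cons _ _ _ _ _).mpr (Or.inl ⟨h1, h2⟩))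
      · exact Or.inr (Or.inl ((two_infix_cons_cons _ _ _ _ _).mpr (Or.inl ⟨h1, h2⟩)))
      · exact Or.inr (Or.inr (Or.inl ((two_infix_cons_cons _ _ _ _ _).mpr (Or.inl ⟨h1, h2⟩))))
      · exact Or.inr (Or.inr (Or.inr ((two_infix_cons_cons _ _ _ _ _).mpr (Or.inl ⟨h1, h2⟩))))
    · rw [if_neg hc, ih]
      have hnc := (not_iff_not.mpr (contains_pairs a b)).mp hc
      push_neg at hnc
      have hiff : (['a','b'] <:+: a :: b :: rest ∨ ['c','d'] <:+: a :: b :: rest ∨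
                   ['p','q'] <:+: a :: b :: rest ∨ ['x','y'] <:+: a :: b :: rest) ↔
                  (['a','b'] <:+: b :: rest ∨ ['c','d'] <:+: b :: rest ∨
                   ['p','q'] <:+: b :: rest ∨ ['x','y'] <:+: b :: rest) := by
        simp only [two_infix_cons_cons]
        constructor
        · rintro ((h | h) | (h | h) | (h | h) | (h | h))
          · exact absurd h.2 (hnc.1 h.1)
          · exact Or.inl h
          · exact absurd h.2 (hnc.2.1 h.1)
          · exact Or.inr (Or.inl h)
          · exact absurd h.2 (hnc.2.2.1 h.1)
          · exact Or.inr (Or.inr (Or.inl h))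
          · exact absurd h.2 (hnc.2.2.2 h.1)
          · exact Or.inr (Or.inr (Or.inr h))
        · rintro (h | h | h | h)
          · exact Or.inl (Or.inr h)
          · exact Or.inr (Or.inl (Or.inr h))
          · exact Or.inr (Or.inr (Or.inl (Or.inr h)))
          · exact Or.inr (Or.inr (Or.inr (Or.inr h)))
      unfold fourSpec
      simp only [hiff]

theorem sideB (text : String) : findExceptions_alt text = fourSpec text.toList := by
  unfold findExceptions_alt
  exact sideB_aux text.toList

-- ===== VERDICT (by name: the statement is the Claim_ definition above) =====
theorem findExceptions_spec : Claim_equal_findExceptions := by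
  intro text _
  unfold Spec_findExceptions
  rw [sideA, sideB]
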